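-- pv_equiv track=rewrite | github.com/renjieliu/personal_projects | googlecodejam/2018/qualificationRound/1.py | currentPower
-- ===== SOURCE A (Python) =====
-- def currentPower(t):
--     total = 0
--     currentPower = 1
--     for i in range(0, len(t)):
--         if t[i] == "S":
--             total += currentPower
--         if t[i] == "C":
--             currentPower *= 2
--     return total
-- ===== SOURCE B (Python) =====
-- def currentPower(t):
--     # First pass: prefix[i] = number of 'C' characters strictly before position i.
--     prefix = []
--     c = 0
--     for ch in t:
--         prefix.append(c)
--         if ch == 'C':
--             c += 1
--     # Second pass: add 2**prefix[i] for every 'S'.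
--     return sum(2 ** p for ch, p in zip(t, prefix) if ch == 'S')
-- ===== Notes on version B (the rewrite author's own statement) =====
-- stated objective: alternative
-- what changed: Replaces the single fused loop with a running power variable by two passes: a first pass builds an explicit prefix table of 'C' counts, and a second pass sums 2**prefix[i] over the 'S' positions.
import Mathlib
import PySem

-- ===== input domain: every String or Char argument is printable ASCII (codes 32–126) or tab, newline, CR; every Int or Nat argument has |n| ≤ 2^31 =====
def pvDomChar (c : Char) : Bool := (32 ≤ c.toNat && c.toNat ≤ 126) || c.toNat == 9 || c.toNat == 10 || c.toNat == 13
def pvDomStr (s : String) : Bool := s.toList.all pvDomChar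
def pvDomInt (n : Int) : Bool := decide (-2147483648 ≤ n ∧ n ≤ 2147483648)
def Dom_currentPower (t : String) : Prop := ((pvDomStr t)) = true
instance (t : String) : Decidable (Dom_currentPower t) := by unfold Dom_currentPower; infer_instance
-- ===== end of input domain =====

-- B replaces A's fused loop (running power) by two passes: a prefix table of 'C' counts,
-- then a sum of 2^prefix[i] over 'S' positions; same cost, different decomposition.

-- ===== PORT A =====
-- A: one loop carrying (total, currentPower), two independent ifs per character.
def currentPower (t : String) : Int :=
  (t.toList.foldl
    (fun (st : Int × Int) ch =>
      let st := if ch = 'S' then (st.1 + st.2, st.2) else st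
      if ch = 'C' then (st.1, st.2 * 2) else st)
    (0, 1)).1

-- ===== PORT B =====
-- B: first pass builds the prefix list of 'C' counts (Source B's first loop).
def cpPrefix : List Char → Nat → List Nat
  | [], _ => []
  | ch :: r, c => c :: cpPrefix r (if ch = 'C' then c + 1 else c)

-- B: second pass sums 2^p over the 'S' positions (Source B's sum over zip).
def currentPower_alt (t : String) : Int :=
  (t.toList.zip (cpPrefix t.toList 0)).foldl
    (fun s p => if p.1 = 'S' then s + 2 ^ p.2 else s) 0

-- ===== PRECONDITION & SPEC =====
def Spec_currentPower (t : String) (out : Int) : Prop := out = currentPower_alt t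
instance (t : String) (out : Int) : Decidable (Spec_currentPower t out) := by unfold Spec_currentPower; infer_instance

-- ===== CLAIM (what is proved, stated in full; the proofs are below) =====
def Claim_equal_currentPower : Prop := ∀ (t : String), Dom_currentPower t → Spec_currentPower t (currentPower t)

-- ===== LEMMAS AND PROOFS =====

-- Loop invariant: A's running power equals 2^(number of 'C's seen), which is
-- exactly the prefix value B pairs with each remaining character.
theorem cp_key (cs : List Char) : ∀ (tot : Int) (c : Nat),
    (cs.foldl
      (fun (st : Int × Int) ch =>
        let st := if ch = 'S' then (st.1 + st.2, st.2) else st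
        if ch = 'C' then (st.1, st.2 * 2) else st)
      (tot, 2 ^ c)).1
    = (cs.zip (cpPrefix cs c)).foldl
        (fun s p => if p.1 = 'S' then s + 2 ^ p.2 else s) tot := by
  induction cs with
  | nil => intro tot c; rfl
  | cons ch r ih =>
    intro tot c
    simp only [List.foldl_cons, cpPrefix, List.zip_cons_cons]
    by_cases hS : ch = 'S'
    · subst hS
      simp only [Char.reduceEq, if_true, if_false]
      exact ih (tot + 2 ^ c) c
    · by_cases hC : ch = 'C'
      · subst hC
        simp only [Char.reduceEq, if_true, if_false]
        have h2 : (2 : Int) ^ c * 2 = 2 ^ (c + 1) := by ring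
        rw [h2]; exact ih tot (c + 1)
      · simp only [hS, hC, if_false]
        exact ih tot c

-- ===== VERDICT (by name: the statement is the Claim_ definition above) =====
theorem currentPower_spec : Claim_equal_currentPower := by
  intro t _
  show currentPower t = currentPower_alt t
  unfold currentPower currentPower_alt
  have := cp_key t.toList 0 0
  simpa using this
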